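-- pv_equiv track=rewrite | github.com/box-key/On-the-Curse-of-Sentence-Length | utils/splits.py | splitDatabyNumberOfUnknowns
-- ===== SOURCE A (Python) =====
-- def splitDatabyNumberOfUnknowns(triples, tick, choice):
--
--     assert (choice=='src' or choice=='ref'), 'choice should be src or ref'
--
--     data = {}
--     # go through all the src-trg pairs
--     for triple in triples:
--         # Get senetnce of src-trg
--         # unk is stored as <unk> in src
--         # unk is stored as <<unk>> in ref
--         num_unk = triple[0].count('<unk>') if choice == 'src' else triple[1].count('<<unk>>')
--         # squash the number into range
--         num_unk_range = int(num_unk/tick)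
--         # check if num_unk is OOD (Out of Dictionary)
--         # if the number already exists in data, append the pair to list
--         if num_unk_range in data:
--             data[num_unk_range].append(triple)
--         # otherwise, add new element and list associated with it
--         else:
--             data.update({num_unk_range:[triple]})
--
--     return data
-- ===== SOURCE B (Python) =====
-- def splitDatabyNumberOfUnknowns(triples, tick, choice):
--     # Alternative decomposition: precompute (key, triple) pairs once, take the
--     # distinct keys in first-seen order, and build each bucket by filtering.
--     assert (choice == 'src' or choice == 'ref'), 'choice should be src or ref'
--
--     def key(triple):
--         num_unk = triple[0].count('<unk>') if choice == 'src' else triple[1].count('<<unk>>')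
--         return int(num_unk / tick)
--
--     keyed = [(key(t), t) for t in triples]
--     order = list(dict.fromkeys(k for k, _ in keyed))
--     return {k: [t for kk, t in keyed if kk == k] for k in order}
-- ===== Notes on version B (the rewrite author's own statement) =====
-- stated objective: alternative
-- what changed: Instead of mutating a dict inside one loop (append-or-create per triple), B computes the keyed pairs once, dedups the keys in first-seen order, and builds each bucket with a per-key filter comprehension.
-- outside the precondition, e.g. on splitDatabyNumberOfUnknowns([('a', 'b', 'c')], 0, 'src'): A raises ZeroDivisionError, B raises ZeroDivisionError; on splitDatabyNumberOfUnknowns([('a', 'b', 'c')], 1, 'x'): A raises AssertionError, B raises AssertionError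
import Mathlib
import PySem

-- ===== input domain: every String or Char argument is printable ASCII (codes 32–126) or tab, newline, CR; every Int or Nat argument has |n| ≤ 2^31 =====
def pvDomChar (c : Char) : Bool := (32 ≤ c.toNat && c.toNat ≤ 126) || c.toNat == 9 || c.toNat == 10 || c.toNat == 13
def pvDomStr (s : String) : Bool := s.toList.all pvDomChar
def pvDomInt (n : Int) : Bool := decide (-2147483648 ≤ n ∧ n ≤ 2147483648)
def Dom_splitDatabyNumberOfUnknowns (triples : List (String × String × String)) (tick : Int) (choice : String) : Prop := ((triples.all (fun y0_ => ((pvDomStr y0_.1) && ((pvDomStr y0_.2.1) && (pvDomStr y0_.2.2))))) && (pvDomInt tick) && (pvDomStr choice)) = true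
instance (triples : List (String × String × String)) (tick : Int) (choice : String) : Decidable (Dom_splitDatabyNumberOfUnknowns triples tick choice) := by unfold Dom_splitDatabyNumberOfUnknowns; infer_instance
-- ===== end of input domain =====

-- B replaces A's single loop mutating a dict by: keyed pairs once, dedup of the keys
-- in first-seen order, and a per-key filter building each bucket (objective: alternative).

-- ===== PORT A =====
-- int(num_unk/tick): Python float division then truncation toward zero; exact equal to
-- Int.tdiv here since 0 ≤ num_unk < 2^53 and the quotient cannot round across an integer.
def splitDatabyNumberOfUnknowns (triples : List (String × String × String)) (tick : Int) (choice : String) : List (Int × List (String × String × String)) :=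
  (triples.foldl
    (fun data triple =>
      let num_unk : Int := if choice == "src" then (PySem.Str.count triple.1 "<unk>" : Int) else (PySem.Str.count triple.2.1 "<<unk>>" : Int)
      let num_unk_range : Int := Int.tdiv num_unk tick
      match data.get? num_unk_range with
      | some l => data.insert num_unk_range (l ++ [triple])
      | none   => data.insert num_unk_range [triple])
    PySem.Dict.empty).items

-- ===== PORT B =====
def splitDatabyNumberOfUnknowns_alt (triples : List (String × String × String)) (tick : Int) (choice : String) : List (Int × List (String × String × String)) :=
  let key : String × String × String → Int := fun t =>
    Int.tdiv (if choice == "src" then (PySem.Str.count t.1 "<unk>" : Int) else (PySem.Str.count t.2.1 "<<unk>>" : Int)) tick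
  let keyed := triples.map (fun t => (key t, t))
  let order := PySem.List.dedup (keyed.map (·.1))
  order.map (fun k => (k, (keyed.filter (fun p => p.1 == k)).map (·.2)))

-- ===== PRECONDITION & SPEC =====
-- Pre_ excludes exactly the inputs where A raises: tick = 0 (ZeroDivisionError in
-- num_unk/tick) and choice other than 'src'/'ref' (AssertionError); B raises there too.
def Pre_splitDatabyNumberOfUnknowns (triples : List (String × String × String)) (tick : Int) (choice : String) : Prop :=
  tick ≠ 0 ∧ (choice = "src" ∨ choice = "ref")
instance (triples : List (String × String × String)) (tick : Int) (choice : String) : Decidable (Pre_splitDatabyNumberOfUnknowns triples tick choice) := by unfold Pre_splitDatabyNumberOfUnknowns; infer_instance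

def pvWitness_splitDatabyNumberOfUnknowns : (List (String × String × String)) × Int × String :=
  ([("a <unk> b", "c <<unk>> d", "e"), ("<unk> <unk>", "x", "y")], 1, "src")

def Spec_splitDatabyNumberOfUnknowns (triples : List (String × String × String)) (tick : Int) (choice : String) (out : List (Int × List (String × String × String))) : Prop := out = splitDatabyNumberOfUnknowns_alt triples tick choice
instance (triples : List (String × String × String)) (tick : Int) (choice : String) (out : List (Int × List (String × String × String))) : Decidable (Spec_splitDatabyNumberOfUnknowns triples tick choice out) := by unfold Spec_splitDatabyNumberOfUnknowns; infer_instance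

-- ===== CLAIM (what is proved, stated in full; the proofs are below) =====
def Claim_equal_splitDatabyNumberOfUnknowns : Prop := ∀ (triples : List (String × String × String)) (tick : Int) (choice : String), Dom_splitDatabyNumberOfUnknowns triples tick choice → Pre_splitDatabyNumberOfUnknowns triples tick choice → Spec_splitDatabyNumberOfUnknowns triples tick choice (splitDatabyNumberOfUnknowns triples tick choice)

-- ===== LEMMAS AND PROOFS =====

-- A's loop body equals the modify form, pointwise.
theorem stepA_eq_modify (d : PySem.Dict Int (List (String × String × String))) (k : Int) (t : String × String × String) :
    (match d.get? k with
     | some l => d.insert k (l ++ [t])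
     | none   => d.insert k [t]) = d.modify k [] (· ++ [t]) := by
  unfold PySem.Dict.modify
  cases h : d.get? k with
  | none => simp [PySem.Dict.getD_eq_get?_getD, h]
  | some l => simp [PySem.Dict.getD_eq_get?_getD, h]

theorem splitDatabyNumberOfUnknowns_spec' (triples : List (String × String × String)) (tick : Int) (choice : String) :
    splitDatabyNumberOfUnknowns triples tick choice = splitDatabyNumberOfUnknowns_alt triples tick choice := by
  unfold splitDatabyNumberOfUnknowns splitDatabyNumberOfUnknowns_alt
  set key : String × String × String → Int := fun t =>
    Int.tdiv (if choice == "src" then (PySem.Str.count t.1 "<unk>" : Int) else (PySem.Str.count t.2.1 "<<unk>>" : Int)) tick with hkey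
  -- rewrite A's fold into the modify form over the keyed pairs
  have hfold : (triples.foldl
      (fun data triple =>
        let num_unk : Int := if choice == "src" then (PySem.Str.count triple.1 "<unk>" : Int) else (PySem.Str.count triple.2.1 "<<unk>>" : Int)
        let num_unk_range : Int := Int.tdiv num_unk tick
        match data.get? num_unk_range with
        | some l => data.insert num_unk_range (l ++ [triple])
        | none   => data.insert num_unk_range [triple])
      PySem.Dict.empty)
      = ((triples.map (fun t => (key t, t))).foldl
          (fun d p => d.modify p.1 [] (· ++ [p.2])) PySem.Dict.empty) := by
    rw [List.foldl_map]
    congr 1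
    funext d t
    simpa [hkey] using stepA_eq_modify d (key t) t
  rw [hfold]
  set keyed := triples.map (fun t => (key t, t)) with hkeyed
  set D := keyed.foldl (fun d p => d.modify p.1 [] (· ++ [p.2])) PySem.Dict.empty with hD
  have hnodup : D.keys.Nodup := by
    rw [hD]
    exact PySem.Dict.nodup_keys_foldl_modify_key keyed Prod.fst []
      (fun d p => (· ++ [p.2])) PySem.Dict.empty (by simp)
  have hkeys : D.keys = PySem.List.dedup (keyed.map (·.1)) := by
    rw [hD]
    have := PySem.Dict.keys_foldl_modify_key (κ := Int) (ν := List (String × String × String))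
      keyed Prod.fst [] (fun d p => (· ++ [p.2])) PySem.Dict.empty
    simpa [PySem.Dict.keys_empty, PySem.Set.update_nil_left, PySem.List.dedup_eq_ofList] using this
  have hget : ∀ k : Int, D.getD k [] = (keyed.filter (fun p => p.1 == k)).map (·.2) := by
    intro k
    rw [hD]
    simpa using PySem.Dict.getD_foldl_modify_append keyed PySem.Dict.empty k
  calc D.items = D.keys.map (fun k => (k, D.getD k [])) := PySem.Dict.items_eq_map_keys D hnodup []
    _ = (PySem.List.dedup (keyed.map (·.1))).map (fun k => (k, (keyed.filter (fun p => p.1 == k)).map (·.2))) := by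
        rw [hkeys]; exact List.map_congr_left (fun k _ => by rw [hget k])

-- ===== VERDICT (by name: the statement is the Claim_ definition above) =====
theorem splitDatabyNumberOfUnknowns_spec : Claim_equal_splitDatabyNumberOfUnknowns := by
  intro triples tick choice _ _
  exact splitDatabyNumberOfUnknowns_spec' triples tick choice
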